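-- pv_equiv track=rewrite | github.com/leo1229/CS61A | project/hog/hog.py | is_swap
-- ===== SOURCE A (Python) =====
-- def is_swap(player_score, opponent_score):
--     """
--     Return whether the two scores should be swapped
--     """
--     # BEGIN PROBLEM 4
--     "*** YOUR CODE HERE ***"
--     power=pow(3,player_score+opponent_score)
--     i=0
--     while power//pow(10,i)!=0:
--         i=i+1
--     end=power%10
--     first=power//pow(10,i-1)
--     return first==end
-- ===== SOURCE B (Python) =====
-- def is_swap(player_score, opponent_score):
--     """
--     Return whether the two scores should be swapped
--     """
--     s = str(3 ** (player_score + opponent_score))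
--     return s[0] == s[-1]
-- ===== Notes on version B (the rewrite author's own statement) =====
-- stated objective: faster
-- what changed: Replaces A's digit-counting while-loop (recomputing pow(10,i) each iteration) and //-,%-based digit extraction by one decimal string conversion and a first-vs-last character comparison; Pre_ excludes negative score sums, where pow(3,n) is a float and both programs run in unportable float arithmetic.
-- outside the precondition, e.g. on is_swap(11, -20): A returns False, B returns True; on is_swap(-1, 0): A returns False, B returns False
import Mathlib
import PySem

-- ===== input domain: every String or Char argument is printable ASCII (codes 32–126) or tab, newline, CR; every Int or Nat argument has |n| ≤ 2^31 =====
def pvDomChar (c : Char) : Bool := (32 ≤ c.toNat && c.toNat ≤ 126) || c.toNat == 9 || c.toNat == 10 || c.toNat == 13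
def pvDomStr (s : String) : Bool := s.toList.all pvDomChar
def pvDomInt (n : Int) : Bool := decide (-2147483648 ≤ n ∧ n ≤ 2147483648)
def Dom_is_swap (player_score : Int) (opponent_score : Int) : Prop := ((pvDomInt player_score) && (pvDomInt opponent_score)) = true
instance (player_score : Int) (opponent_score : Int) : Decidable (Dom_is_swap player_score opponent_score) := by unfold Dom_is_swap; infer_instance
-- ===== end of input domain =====

-- B converts 3^(a+b) to its decimal string once and compares first and last character,
-- replacing A's digit-counting loop and //-,%-based digit extraction (measured faster).


-- ===== PORT A =====
-- A's while loop: i starts at 0 and increments while power // 10**i != 0.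
-- On Pre_ (nonnegative score sum) power = 3^(a+b) ≥ 1, so every Python operand is a
-- nonnegative int and Python's // and % coincide with Nat division/mod; the port
-- therefore carries the loop state over Nat, step for step.
def isSwapLoop (power : Nat) (i : Nat) : Nat :=
  if h : power / 10 ^ i ≠ 0 then isSwapLoop power (i + 1) else i
termination_by power + 1 - i
decreasing_by
  have h10 : 10 ^ i ≤ power := by
    by_contra hlt
    exact h (Nat.div_eq_of_lt (by omega))
  have hi : i < 10 ^ i := Nat.lt_pow_self (by norm_num)
  omega

def is_swap (player_score : Int) (opponent_score : Int) : Bool :=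
  let power : Nat := 3 ^ (player_score + opponent_score).toNat
  let i := isSwapLoop power 0
  let e := power % 10
  let first := power / 10 ^ (i - 1)
  first == e

-- ===== PORT B =====
def is_swap_alt (player_score : Int) (opponent_score : Int) : Bool :=
  let s := PySem.Int.toStr ((3 : Int) ^ (player_score + opponent_score).toNat)
  PySem.Str.pyGet? s 0 == PySem.Str.pyGet? s (-1)

-- ===== PRECONDITION & SPEC =====
-- Pre_ excludes negative score sums: there Python's pow(3, n) is a float and A's whole
-- computation (and B's) runs in unportable float arithmetic; game scores are nonnegative.
def Pre_is_swap (player_score : Int) (opponent_score : Int) : Prop :=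
  0 ≤ player_score + opponent_score
instance (player_score : Int) (opponent_score : Int) : Decidable (Pre_is_swap player_score opponent_score) := by unfold Pre_is_swap; infer_instance

def pvWitness_is_swap : Int × Int := (1, 2)

def Spec_is_swap (player_score : Int) (opponent_score : Int) (out : Bool) : Prop := out = is_swap_alt player_score opponent_score
instance (player_score : Int) (opponent_score : Int) (out : Bool) : Decidable (Spec_is_swap player_score opponent_score out) := by unfold Spec_is_swap; infer_instance

-- ===== CLAIM (what is proved, stated in full; the proofs are below) =====
def Claim_equal_is_swap : Prop := ∀ (player_score : Int) (opponent_score : Int), Dom_is_swap player_score opponent_score → Pre_is_swap player_score opponent_score → Spec_is_swap player_score opponent_score (is_swap player_score opponent_score)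

-- ===== LEMMAS AND PROOFS =====

-- A's loop counts the decimal digits of power.
lemma isSwapLoop_eq_length (p : Nat) (hp : p ≠ 0) :
    ∀ i, i ≤ (Nat.digits 10 p).length → isSwapLoop p i = (Nat.digits 10 p).length := by
  intro i hi
  induction h : (Nat.digits 10 p).length - i generalizing i with
  | zero =>
    have hiL : i = (Nat.digits 10 p).length := by omega
    have hz : p / 10 ^ i = 0 :=
      Nat.div_eq_of_lt (by rw [hiL]; exact Nat.lt_base_pow_length_digits (by norm_num))
    rw [isSwapLoop, dif_neg (by omega : ¬ p / 10 ^ i ≠ 0)]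
    exact hiL
  | succ n ih =>
    have hlt : i < (Nat.digits 10 p).length := by omega
    have hnil : Nat.digits 10 p ≠ [] := Nat.digits_ne_nil_iff_ne_zero.mpr hp
    have hL1 : 1 ≤ (Nat.digits 10 p).length := List.length_pos_iff.mpr hnil
    have hle : 10 ^ ((Nat.digits 10 p).length - 1) ≤ p := by
      have h1 := Nat.base_pow_length_digits_le 10 p (by norm_num) hp
      have h2 : 10 * 10 ^ ((Nat.digits 10 p).length - 1) = 10 ^ (Nat.digits 10 p).length := by
        rw [← pow_succ']
        congr 1
        omega
      omega
    have hle' : 10 ^ i ≤ p :=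
      le_trans (Nat.pow_le_pow_right (by norm_num) (by omega)) hle
    have hne : p / 10 ^ i ≠ 0 := by
      have := (Nat.one_le_div_iff (Nat.pow_pos (by norm_num))).mpr hle'
      omega
    rw [isSwapLoop, dif_pos hne]
    exact ih (i + 1) (by omega) (by omega)

-- The leading decimal digit, as A extracts it.
lemma leading_digit (p : Nat) (hp : p ≠ 0) :
    p / 10 ^ ((Nat.digits 10 p).length - 1)
      = (Nat.digits 10 p).getLast (Nat.digits_ne_nil_iff_ne_zero.mpr hp) := by
  induction p using Nat.strong_induction_on with
  | _ p ih =>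
    by_cases h10 : p < 10
    · have hdig : Nat.digits 10 p = [p] := by
        rw [Nat.digits_def' (by norm_num) (Nat.pos_of_ne_zero hp)]
        simp [Nat.mod_eq_of_lt h10, Nat.div_eq_of_lt h10]
      simp [hdig]
    · have hq : p / 10 ≠ 0 := by
        have : 1 ≤ p / 10 := (Nat.one_le_div_iff (by norm_num)).mpr (by omega)
        omega
      have hcons : Nat.digits 10 p = p % 10 :: Nat.digits 10 (p / 10) :=
        Nat.digits_def' (by norm_num) (Nat.pos_of_ne_zero hp)
      have hqlen : 1 ≤ (Nat.digits 10 (p / 10)).length :=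
        List.length_pos_iff.mpr (Nat.digits_ne_nil_iff_ne_zero.mpr hq)
      have hlen : (Nat.digits 10 p).length = (Nat.digits 10 (p / 10)).length + 1 := by
        rw [hcons]; simp
      have hih := ih (p / 10) (Nat.div_lt_self (Nat.pos_of_ne_zero hp) (by norm_num)) hq
      rw [Nat.digits_getLast p (by norm_num)
        (Nat.digits_ne_nil_iff_ne_zero.mpr hp) (Nat.digits_ne_nil_iff_ne_zero.mpr hq),
        ← hih, hlen]
      have hpow : (10 : Nat) ^ ((Nat.digits 10 (p / 10)).length + 1 - 1)
          = 10 * 10 ^ ((Nat.digits 10 (p / 10)).length - 1) := by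
        rw [Nat.add_sub_cancel]
        conv_lhs => rw [← Nat.sub_add_cancel hqlen]
        rw [pow_succ, Nat.mul_comm]
      rw [hpow, ← Nat.div_div_eq_div_mul]

-- Nat.toDigits (what str(n) prints) is the reversed digit list mapped through digitChar.
lemma toDigitsCore_eq (f : Nat) :
    ∀ (n : Nat) (acc : List Char), n < f → n ≠ 0 →
      Nat.toDigitsCore 10 f n acc
        = ((Nat.digits 10 n).map Nat.digitChar).reverse ++ acc := by
  induction f with
  | zero => intro n acc h _; omega
  | succ f ih =>
    intro n acc hnf hn
    have hcons : Nat.digits 10 n = n % 10 :: Nat.digits 10 (n / 10) :=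
      Nat.digits_def' (by norm_num) (Nat.pos_of_ne_zero hn)
    rw [Nat.toDigitsCore]
    by_cases hz : n / 10 = 0
    · simp [hz, hcons]
    · have hlt : n / 10 < n := Nat.div_lt_self (Nat.pos_of_ne_zero hn) (by norm_num)
      simp only [hz, ite_false]
      rw [ih (n / 10) _ (by omega) hz, hcons]
      simp

lemma toDigits_eq (n : Nat) (hn : n ≠ 0) :
    Nat.toDigits 10 n = ((Nat.digits 10 n).map Nat.digitChar).reverse := by
  have := toDigitsCore_eq (n + 1) n [] (by omega) hn
  simpa [Nat.toDigits] using this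

-- digitChar is injective on single digits.
lemma digitChar_inj {a b : Nat} (ha : a < 10) (hb : b < 10) :
    Nat.digitChar a = Nat.digitChar b ↔ a = b := by
  interval_cases a <;> interval_cases b <;> simp [Nat.digitChar]

-- ===== VERDICT (by name: the statement is the Claim_ definition above) =====
theorem is_swap_spec : Claim_equal_is_swap := by
  intro a b _ hpre
  unfold Spec_is_swap is_swap is_swap_alt Pre_is_swap at *
  set e := (a + b).toNat with he
  set p : Nat := 3 ^ e with hpdef
  have hp : p ≠ 0 := by positivity
  have hpi : ((3 : Int) ^ e) = ((p : Nat) : Int) := by push_cast [hpdef]; ring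
  have hnil : Nat.digits 10 p ≠ [] := Nat.digits_ne_nil_iff_ne_zero.mpr hp
  -- A's side: loop length and extracted digits
  have hloop : isSwapLoop p 0 = (Nat.digits 10 p).length :=
    isSwapLoop_eq_length p hp 0 (by omega)
  have hfirst : p / 10 ^ (isSwapLoop p 0 - 1) = (Nat.digits 10 p).getLast hnil := by
    rw [hloop]; exact leading_digit p hp
  have hhead? : (Nat.digits 10 p).head? = some (p % 10) := by
    rw [Nat.digits_def' (by norm_num : (1:Nat) < 10) (Nat.pos_of_ne_zero hp)]
    rfl
  have hlast? : (Nat.digits 10 p).getLast? = some ((Nat.digits 10 p).getLast hnil) :=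
    List.getLast?_eq_some_getLast hnil
  -- B's side: the string is the reversed digit list mapped through digitChar
  have hchars : (PySem.Int.toStr ((3 : Int) ^ e)).toList
      = ((Nat.digits 10 p).map Nat.digitChar).reverse := by
    rw [PySem.Int.toList_toStr, hpi]
    simp [PySem.Int.toChars, toDigits_eq p hp]
  have hget0 : PySem.Str.pyGet? (PySem.Int.toStr ((3 : Int) ^ e)) 0
      = some (Nat.digitChar ((Nat.digits 10 p).getLast hnil)) := by
    simp [PySem.Str.pyGet?_eq, PySem.Chars.pyGet?_eq_listPyGet?, hchars,
      PySem.List.pyGet?_zero, ← List.head?_eq_getElem?, List.head?_reverse,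
      List.getLast?_map, hlast?]
  have hgetm1 : PySem.Str.pyGet? (PySem.Int.toStr ((3 : Int) ^ e)) (-1)
      = some (Nat.digitChar (p % 10)) := by
    simp [PySem.Str.pyGet?_eq, PySem.Chars.pyGet?_eq_listPyGet?, hchars,
      PySem.List.pyGet?_neg_one, List.getLast?_reverse, List.head?_map, hhead?]
  simp only [hget0, hgetm1, hfirst]
  have hlast10 : (Nat.digits 10 p).getLast hnil < 10 :=
    Nat.digits_lt_base (by norm_num) (List.getLast_mem hnil)
  have hmod10 : p % 10 < 10 := Nat.mod_lt _ (by norm_num)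
  rw [Bool.eq_iff_iff]
  simp [beq_iff_eq, digitChar_inj hlast10 hmod10]
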